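-- pv_equiv track=rewrite | github.com/weAIDB/CrackSQL | backend/preprocessor/TreeParser/antlr_tree/antlr_tree_parser.py | merge_repr
-- ===== SOURCE A (Python) =====
-- def merge_repr(rep) -> str:
--     res = ''
--     quote_flag = False
--     for i in range(len(rep)):
--         if rep[i] == '\'':
--             quote_flag = not quote_flag
--         elif quote_flag:
--             res = res + rep[i]
--     return res
-- ===== SOURCE B (Python) =====
-- def merge_repr(rep) -> str:
--     return ''.join(rep.split("'")[1::2])
-- ===== Notes on version B (the rewrite author's own statement) =====
-- stated objective: faster
-- what changed: Replaces the character-by-character quote-toggle loop with quadratic string concatenation by a split on the quote character and a single join of the odd-indexed (inside-quote) segments.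
import Mathlib
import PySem

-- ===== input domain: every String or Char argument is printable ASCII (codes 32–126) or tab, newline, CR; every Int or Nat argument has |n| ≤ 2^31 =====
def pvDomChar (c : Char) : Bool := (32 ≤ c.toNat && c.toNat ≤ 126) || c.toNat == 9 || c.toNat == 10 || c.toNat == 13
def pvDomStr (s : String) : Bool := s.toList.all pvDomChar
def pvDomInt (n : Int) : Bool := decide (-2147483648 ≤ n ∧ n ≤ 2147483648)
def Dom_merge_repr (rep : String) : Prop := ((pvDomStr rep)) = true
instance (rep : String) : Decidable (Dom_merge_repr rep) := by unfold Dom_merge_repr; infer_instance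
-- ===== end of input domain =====

-- B replaces A's character-by-character quote-toggle loop (quadratic string concatenation) with
-- split-on-quote + join of the odd-indexed segments (measured faster; same return value).

-- ===== PORT A =====
-- A's loop over range(len(rep)) reading rep[i] (always in range) is ported as a fold over the
-- characters, with res kept as a List Char (exact: '' + appending one char each step).
def merge_repr (rep : String) : String :=
  let st := rep.toList.foldl
    (fun (st : List Char × Bool) c =>
      if c = '\'' then (st.1, !st.2)
      else if st.2 then (st.1 ++ [c], st.2) else st)
    ([], false)
  String.ofList st.1

-- ===== PORT B =====
-- rep.split("'") → (PySem.Str.split? rep "'").getD [] (sep is nonempty, so split? is some);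
-- [1::2] → PySem.List.slice? … (some 1) none 2 (step ≠ 0, so slice? is some); ''.join → Str.join.
def merge_repr_alt (rep : String) : String :=
  PySem.Str.join ""
    ((PySem.List.slice? ((PySem.Str.split? rep "'").getD []) (some 1) none 2).getD [])

-- ===== PRECONDITION & SPEC =====
def Spec_merge_repr (rep : String) (out : String) : Prop := out = merge_repr_alt rep
instance (rep : String) (out : String) : Decidable (Spec_merge_repr rep out) := by unfold Spec_merge_repr; infer_instance

-- ===== CLAIM (what is proved, stated in full; the proofs are below) =====
def Claim_equal_merge_repr : Prop := ∀ (rep : String), Dom_merge_repr rep → Spec_merge_repr rep (merge_repr rep)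

-- ===== LEMMAS AND PROOFS =====

-- inside-quote characters, recursively (characterisation of A's loop)
def pvInside : List Char → Bool → List Char
  | [], _ => []
  | c :: cs, f =>
    if c = '\'' then pvInside cs (!f)
    else if f then c :: pvInside cs f else pvInside cs f

theorem pvFoldl_inside (l : List Char) : ∀ (acc : List Char) (f : Bool),
    (l.foldl
      (fun (st : List Char × Bool) c =>
        if c = '\'' then (st.1, !st.2)
        else if st.2 then (st.1 ++ [c], st.2) else st)
      (acc, f)).1 = acc ++ pvInside l f := by
  induction l with
  | nil => intro acc f; simp [pvInside]
  | cons c cs ih =>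
    intro acc f
    by_cases hc : c = '\''
    · simp [List.foldl_cons, hc, pvInside, ih]
    · by_cases hf : f = true
      · simp [List.foldl_cons, hc, hf, pvInside, ih]
      · simp at hf
        simp [List.foldl_cons, hc, hf, pvInside, ih]

-- split on a single character, tail-style (characterisation of Chars.splitOn with a 1-char sep)
def pvSplit1 (q : Char) (pre : List Char) : List Char → List (List Char)
  | [] => [pre]
  | c :: rest => if c = q then pre :: pvSplit1 q [] rest else pvSplit1 q (pre ++ [c]) rest

theorem pvGo_eq (q : Char) : ∀ (fuel : Nat) (l cur : List Char) (acc : List (List Char)), l.length < fuel →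
    PySem.Chars.splitOn.go [q] fuel l cur acc = acc.reverse ++ pvSplit1 q cur.reverse l := by
  intro fuel
  induction fuel with
  | zero => intro l cur acc h; omega
  | succ f ih =>
    intro l cur acc h
    cases l with
    | nil => rw [PySem.Chars.splitOn.go.eq_def]; simp [pvSplit1]
    | cons c rest =>
      by_cases hc : c = q
      · have hp : List.isPrefixOf [q] (c :: rest) = true := by
          simp [List.isPrefixOf, hc]
        rw [PySem.Chars.splitOn.go.eq_def]
        simp only [hc]
        rw [ih _ _ _ (by simp at h ⊢; omega)]
        simp [pvSplit1]
      · have hp : List.isPrefixOf [q] (c :: rest) = false := by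
          simp [List.isPrefixOf]
          intro hqc; exact absurd hqc.symm hc
        rw [PySem.Chars.splitOn.go.eq_def]
        simp only [hp, Bool.false_eq_true, if_false]
        rw [ih _ _ _ (by simp at h ⊢; omega)]
        simp [pvSplit1, hc]

theorem pvSplitOn_eq (q : Char) (l : List Char) :
    PySem.Chars.splitOn l [q] = pvSplit1 q [] l := by
  have := pvGo_eq q (l.length + 1) l [] [] (by omega)
  simpa [PySem.Chars.splitOn] using this

-- every other element, starting at index 1 / index 0
def pvOdd {α : Type} : List α → List α
  | [] => []
  | [_] => []
  | _ :: x :: rest => x :: pvOdd rest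
def pvEven {α : Type} : List α → List α
  | [] => []
  | x :: xs => x :: pvOdd xs

theorem pvOdd_cons {α : Type} (x : α) (xs : List α) : pvOdd (x :: xs) = pvEven xs := by
  cases xs <;> simp [pvOdd, pvEven]

theorem pvOddEven_split (l : List Char) : ∀ (pre : List Char),
    (pvOdd (pvSplit1 '\'' pre l)).flatten = pvInside l false ∧
    (pvEven (pvSplit1 '\'' pre l)).flatten = pre ++ pvInside l true := by
  induction l with
  | nil => intro pre; simp [pvSplit1, pvOdd, pvEven, pvInside]
  | cons c rest ih =>
    intro pre
    by_cases hc : c = '\''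
    · subst hc
      have hsplit : pvSplit1 '\'' pre ('\'' :: rest) = pre :: pvSplit1 '\'' [] rest := by
        simp [pvSplit1]
      refine ⟨?_, ?_⟩
      · rw [hsplit, pvOdd_cons, (ih []).2]
        simp [pvInside]
      · rw [hsplit, show pvEven (pre :: pvSplit1 '\'' [] rest)
              = pre :: pvOdd (pvSplit1 '\'' [] rest) from rfl,
            List.flatten_cons, (ih []).1]
        simp [pvInside]
    · refine ⟨?_, ?_⟩
      · simp [pvSplit1, pvInside, hc, (ih (pre ++ [c])).1]
      · simp [pvSplit1, pvInside, hc, (ih (pre ++ [c])).2]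

-- slice? xs 1 : : 2 picks exactly the odd-indexed elements
theorem pvFilterMap_odd {α : Type} : ∀ (xs : List α) (c : Nat), xs.length ≤ 2 * c + 1 →
    List.filterMap (fun k : Nat => xs[1 + 2 * k]?) (List.range c) = pvOdd xs := by
  intro xs
  induction xs using pvOdd.induct with
  | case1 =>
    intro c h; simp [pvOdd]
  | case2 a =>
    intro c h; simp [pvOdd]
  | case3 a b rest ih =>
      intro c h
      simp at h
      obtain ⟨c', rfl⟩ : ∃ c', c = c' + 1 := ⟨c - 1, by omega⟩
      rw [List.range_succ_eq_map, List.filterMap_cons, List.filterMap_map]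
      have h0 : (a :: b :: rest)[1 + 2 * 0]? = some b := by simp
      rw [h0]
      have : (fun k : Nat => (a :: b :: rest)[1 + 2 * k]?) ∘ Nat.succ
           = fun k : Nat => rest[1 + 2 * k]? := by
        funext k
        show (a :: b :: rest)[1 + 2 * (k + 1)]? = rest[1 + 2 * k]?
        have : 1 + 2 * (k + 1) = (1 + 2 * k) + 2 := by omega
        rw [this]; rfl
      rw [this, ih c' (by omega)]
      simp [pvOdd]

theorem pvOdd_map {A B : Type} (f : A → B) (xs : List A) :
    pvOdd (xs.map f) = (pvOdd xs).map f := by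
  induction xs using pvOdd.induct with
  | case1 => simp [pvOdd]
  | case2 a => simp [pvOdd]
  | case3 a b rest ih => simp [pvOdd, ih]

theorem pvSlice_odd {α : Type} (xs : List α) :
    PySem.List.slice? xs (some 1) none 2 = some (pvOdd xs) := by
  cases xs with
  | nil => rfl
  | cons a rest =>
    rw [PySem.List.slice?]
    rw [if_neg (by omega)]
    simp only [PySem.List.sliceIndices]
    congr 1
    show List.filterMap
        (fun k : Nat => (a :: rest)[((min 1 ((a::rest).length:Int)) + 2 * (k:Int)).toNat]?)
        (List.range (if 0 < (2:Int) then if (min 1 ((a::rest).length:Int)) < ((a::rest).length:Int) then ((((a::rest).length:Int) - (min 1 ((a::rest).length:Int)) + 2 - 1) / 2).toNat else 0 else if ((a::rest).length:Int) < (min 1 ((a::rest).length:Int)) then (((min 1 ((a::rest).length:Int)) - ((a::rest).length:Int) + -2 - 1) / -2).toNat else 0))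
      = pvOdd (a :: rest)
    have hmin : min 1 ((a::rest).length:Int) = 1 := by
      have h : (a::rest).length = rest.length + 1 := rfl
      rw [h]
      omega
    rw [hmin]
    have hidx : (fun k : Nat => (a :: rest)[((1:Int) + 2 * (k:Int)).toNat]?)
              = fun k : Nat => (a :: rest)[1 + 2 * k]? := by
      funext k; congr 1
    rw [hidx]
    have hlen : (a::rest).length = rest.length + 1 := rfl
    have hcount : (if 0 < (2:Int) then if (1:Int) < (((a::rest).length):Int) then ((((a::rest).length:Int) - 1 + 2 - 1) / 2).toNat else 0 else if (((a::rest).length):Int) < 1 then (((1:Int) - ((a::rest).length:Int) + -2 - 1) / -2).toNat else 0) = (a::rest).length / 2 := by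
      rw [if_pos (by omega)]
      by_cases h1 : (1:Int) < (((a::rest).length):Int)
      · rw [if_pos h1]
        have h2 : ((((a::rest).length):Int) - 1 + 2 - 1) = (((a::rest).length):Int) := by ring
        rw [h2]; omega
      · rw [if_neg h1]
        rw [hlen] at h1 ⊢
        omega
    rw [hcount]
    exact pvFilterMap_odd (a :: rest) ((a :: rest).length / 2) (by omega)

theorem pvFlatten_intersperse {α : Type} (L : List (List α)) :
    (List.intersperse ([] : List α) L).flatten = L.flatten := by
  induction L with
  | nil => simp
  | cons x xs ih =>
    cases xs with
    | nil => simp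
    | cons y ys =>
      rw [(rfl : List.intersperse ([] : List α) (x :: y :: ys) = x :: [] :: List.intersperse ([] : List α) (y :: ys))]
      simp [ih]

-- ===== VERDICT (by name: the statement is the Claim_ definition above) =====
theorem merge_repr_spec : Claim_equal_merge_repr := by
  intro rep _
  unfold Spec_merge_repr merge_repr merge_repr_alt
  rw [PySem.Str.split?]
  have hsep : ("'" : String).toList = ['\''] := rfl
  rw [hsep]
  rw [PySem.Chars.split?]
  rw [if_neg (by simp)]
  simp only [Option.map_some, Option.getD_some]
  rw [pvSplitOn_eq]
  rw [pvSlice_odd]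
  rw [pvOdd_map]
  simp only [Option.getD_some]
  rw [PySem.Str.join]
  simp only [List.map_map]
  rw [(show (String.toList ∘ String.ofList) = id from by funext l; simp), List.map_id]
  have hjoin : PySem.Chars.join (("" : String).toList) (pvOdd (pvSplit1 '\'' [] rep.toList))
      = (pvOdd (pvSplit1 '\'' [] rep.toList)).flatten := by
    show PySem.Chars.join [] _ = _
    rw [PySem.Chars.join]
    simp only [List.intercalate]
    exact pvFlatten_intersperse _
  rw [hjoin, (pvOddEven_split rep.toList []).1]
  congr 1
  simpa using pvFoldl_inside rep.toList [] false
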